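-- pv_equiv track=rewrite | github.com/BigWattanachai/trip-planning-assistant | backend/agents/video_agent.py | _identify_content_gaps
-- ===== SOURCE A (Python) =====
-- from typing import Dict, List, Any
--
-- def _identify_content_gaps(videos: List[Dict], destination: str) -> List[str]:
--     """Identify missing content areas"""
--     covered_topics = set()
--
--     for video in videos:
--         title_lower = video['title'].lower()
--         if 'food' in title_lower:
--             covered_topics.add('food')
--         if 'hotel' in title_lower or 'accommodation' in title_lower:
--             covered_topics.add('accommodation')
--         if 'transport' in title_lower:
--             covered_topics.add('transportation')
--         if 'budget' in title_lower:
--             covered_topics.add('budget')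
--         if 'culture' in title_lower or 'history' in title_lower:
--             covered_topics.add('culture')
--         if 'shopping' in title_lower:
--             covered_topics.add('shopping')
--
--     all_topics = {'food', 'accommodation', 'transportation', 'budget', 'culture', 'shopping', 'safety', 'nightlife'}
--
--     missing_topics = all_topics - covered_topics
--
--     gaps = []
--     for topic in missing_topics:
--         gaps.append(f"Limited coverage of {topic} in {destination}")
--
--     return gaps
-- ===== SOURCE B (Python) =====
-- def _identify_content_gaps(videos, destination):
--     """Identify missing content areas"""
--     topic_keywords = {
--         'food': ['food'],
--         'accommodation': ['hotel', 'accommodation'],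
--         'transportation': ['transport'],
--         'budget': ['budget'],
--         'culture': ['culture', 'history'],
--         'shopping': ['shopping'],
--     }
--     titles = [video['title'].lower() for video in videos]
--     covered_topics = {topic for topic, keywords in topic_keywords.items()
--                       if any(kw in title for kw in keywords for title in titles)}
--     all_topics = {'food', 'accommodation', 'transportation', 'budget',
--                   'culture', 'shopping', 'safety', 'nightlife'}
--     return [f"Limited coverage of {topic} in {destination}"
--             for topic in all_topics - covered_topics]
-- ===== Notes on version B (the rewrite author's own statement) =====
-- stated objective: alternative
-- what changed: Inverts the traversal: instead of A's single pass over videos classifying each title against six hard-coded if-chains into an accumulating set, B lowercases all titles once and then, per topic of an explicit topic->keywords table, scans the titles for any keyword hit; the same 8-topic set difference and f-string produce the result.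
import Mathlib
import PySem

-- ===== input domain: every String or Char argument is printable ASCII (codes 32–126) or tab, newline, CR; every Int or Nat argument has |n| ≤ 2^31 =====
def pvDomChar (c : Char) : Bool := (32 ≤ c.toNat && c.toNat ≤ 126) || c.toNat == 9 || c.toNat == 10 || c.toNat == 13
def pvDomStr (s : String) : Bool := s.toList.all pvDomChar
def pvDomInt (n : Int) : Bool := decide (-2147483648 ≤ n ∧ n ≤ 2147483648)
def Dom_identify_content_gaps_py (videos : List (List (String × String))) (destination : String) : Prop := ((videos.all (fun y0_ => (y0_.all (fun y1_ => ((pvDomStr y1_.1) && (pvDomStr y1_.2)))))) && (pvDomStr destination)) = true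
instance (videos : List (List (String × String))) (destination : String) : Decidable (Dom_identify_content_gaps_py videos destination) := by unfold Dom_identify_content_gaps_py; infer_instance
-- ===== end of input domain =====

-- B inverts A's traversal: one pass lowering every title, then a per-topic keyword-table scan;
-- same 8-topic set difference. Equal return value on inputs where every video has a 'title' key.
-- The ports emit the set difference in a fixed order (Python's set iteration order is hash-based;
-- outputs are compared as sets).

-- ===== PORT A =====
-- one iteration of A's 'for video in videos' loop: classify the lowered title with six if-chains
def icgStep (cov : PySem.Set String) (video : List (String × String)) : PySem.Set String :=
  let tl := PySem.Str.lower (((PySem.Dict.mk video).get? "title").getD "")  -- Pre_ guarantees the key; "" unreachable under Pre_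
  let cov := if PySem.Str.isIn "food" tl then PySem.Set.add cov "food" else cov
  let cov := if PySem.Str.isIn "hotel" tl || PySem.Str.isIn "accommodation" tl then PySem.Set.add cov "accommodation" else cov
  let cov := if PySem.Str.isIn "transport" tl then PySem.Set.add cov "transportation" else cov
  let cov := if PySem.Str.isIn "budget" tl then PySem.Set.add cov "budget" else cov
  let cov := if PySem.Str.isIn "culture" tl || PySem.Str.isIn "history" tl then PySem.Set.add cov "culture" else cov
  if PySem.Str.isIn "shopping" tl then PySem.Set.add cov "shopping" else cov

def identify_content_gaps_py (videos : List (List (String × String))) (destination : String) : List String :=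
  let covered_topics := videos.foldl icgStep PySem.Set.empty
  let all_topics : PySem.Set String := PySem.Set.ofList ["food", "accommodation", "transportation", "budget", "culture", "shopping", "safety", "nightlife"]
  let missing_topics := PySem.Set.diff all_topics covered_topics
  -- 'for topic in missing_topics: gaps.append(...)': set iteration order is not modelled; fixed order here
  missing_topics.foldl (fun gaps topic => gaps ++ ["Limited coverage of " ++ topic ++ " in " ++ destination]) []

-- ===== PORT B =====
def icgKeywords : List (String × List String) :=
  [("food", ["food"]), ("accommodation", ["hotel", "accommodation"]), ("transportation", ["transport"]),
   ("budget", ["budget"]), ("culture", ["culture", "history"]), ("shopping", ["shopping"])]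

def identify_content_gaps_py_alt (videos : List (List (String × String))) (destination : String) : List String :=
  let titles := videos.map (fun video => PySem.Str.lower (((PySem.Dict.mk video).get? "title").getD ""))
  let covered_topics : PySem.Set String :=
    PySem.Set.ofList ((icgKeywords.filter
      (fun p => p.2.any (fun kw => titles.any (fun title => PySem.Str.isIn kw title)))).map Prod.fst)
  let all_topics : PySem.Set String := PySem.Set.ofList ["food", "accommodation", "transportation", "budget", "culture", "shopping", "safety", "nightlife"]
  (PySem.Set.diff all_topics covered_topics).map (fun topic => "Limited coverage of " ++ topic ++ " in " ++ destination)

-- ===== PRECONDITION & SPEC =====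
-- Pre_ excludes exactly the inputs where some video lacks a 'title' key: there Python A raises KeyError.
def Pre_identify_content_gaps_py (videos : List (List (String × String))) (destination : String) : Prop :=
  ∀ v ∈ videos, ((PySem.Dict.mk v).get? "title").isSome
instance (videos : List (List (String × String))) (destination : String) : Decidable (Pre_identify_content_gaps_py videos destination) := by unfold Pre_identify_content_gaps_py; infer_instance
def pvWitness_identify_content_gaps_py : (List (List (String × String))) × String :=
  ([[("title", "Street Food tour")], [("title", "Hotel guide"), ("url", "u")]], "Bangkok")

def Spec_identify_content_gaps_py (videos : List (List (String × String))) (destination : String) (out : List String) : Prop := out = identify_content_gaps_py_alt videos destination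
instance (videos : List (List (String × String))) (destination : String) (out : List String) : Decidable (Spec_identify_content_gaps_py videos destination out) := by unfold Spec_identify_content_gaps_py; infer_instance

-- ===== CLAIM (what is proved, stated in full; the proofs are below) =====
def Claim_equal_identify_content_gaps_py : Prop := ∀ (videos : List (List (String × String))) (destination : String), Dom_identify_content_gaps_py videos destination → Pre_identify_content_gaps_py videos destination → Spec_identify_content_gaps_py videos destination (identify_content_gaps_py videos destination)

-- ===== LEMMAS AND PROOFS =====

-- the lowered title of one video, as both ports compute it
def icgTitle (video : List (String × String)) : String :=
  PySem.Str.lower (((PySem.Dict.mk video).get? "title").getD "")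

-- which topic A's step adds for one video
def icgPred (t : String) (video : List (String × String)) : Prop :=
  (t = "food" ∧ PySem.Str.isIn "food" (icgTitle video) = true) ∨
  (t = "accommodation" ∧ (PySem.Str.isIn "hotel" (icgTitle video) || PySem.Str.isIn "accommodation" (icgTitle video)) = true) ∨
  (t = "transportation" ∧ PySem.Str.isIn "transport" (icgTitle video) = true) ∨
  (t = "budget" ∧ PySem.Str.isIn "budget" (icgTitle video) = true) ∨
  (t = "culture" ∧ (PySem.Str.isIn "culture" (icgTitle video) || PySem.Str.isIn "history" (icgTitle video)) = true) ∨
  (t = "shopping" ∧ PySem.Str.isIn "shopping" (icgTitle video) = true)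

set_option maxHeartbeats 1000000 in
lemma icg_step_mem (cov : PySem.Set String) (v : List (String × String)) (t : String) :
    t ∈ icgStep cov v ↔ t ∈ cov ∨ icgPred t v := by
  unfold icgStep icgPred icgTitle
  dsimp only
  split_ifs with h1 h2 h3 h4 h5 h6 <;>
    simp_all [PySem.Set.mem_add, or_assoc]

lemma icg_fold_mem (videos : List (List (String × String))) (cov : PySem.Set String) (t : String) :
    t ∈ videos.foldl icgStep cov ↔ t ∈ cov ∨ ∃ v ∈ videos, icgPred t v := by
  induction videos generalizing cov with
  | nil => simp
  | cons v vs ih =>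
      rw [List.foldl_cons, ih, icg_step_mem]
      simp only [List.mem_cons]
      constructor
      · rintro (( h | h ) | ⟨w, hw, hp⟩)
        · exact Or.inl h
        · exact Or.inr ⟨v, Or.inl rfl, h⟩
        · exact Or.inr ⟨w, Or.inr hw, hp⟩
      · rintro (h | ⟨w, (rfl | hw), hp⟩)
        · exact Or.inl (Or.inl h)
        · exact Or.inl (Or.inr hp)
        · exact Or.inr ⟨w, hw, hp⟩

-- ===== VERDICT (by name: the statement is the Claim_ definition above) =====
set_option maxHeartbeats 2000000 in
theorem identify_content_gaps_py_spec : Claim_equal_identify_content_gaps_py := by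
  intro videos destination _hdom _hpre
  unfold Spec_identify_content_gaps_py identify_content_gaps_py identify_content_gaps_py_alt
  dsimp only
  rw [PySem.List.foldl_append_singleton_eq_map, List.nil_append]
  unfold PySem.Set.diff
  apply congrArg
  apply List.filter_congr
  intro x hx
  have hx' : x ∈ ["food", "accommodation", "transportation", "budget", "culture", "shopping", "safety", "nightlife"] := by
    simpa [pysem] using hx
  congr 1
  rw [Bool.eq_iff_iff]
  simp only [PySem.Set.contains_iff]
  rw [icg_fold_mem]
  simp only [pysem, List.mem_map, List.mem_filter, PySem.Set.empty, List.not_mem_nil, false_or]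
  fin_cases hx' <;>
    simp [icgKeywords, icgPred, icgTitle, List.any_map, List.any_eq_true, and_or_left, exists_or]
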